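-- pv_equiv track=rewrite | github.com/talhajamal11/mathematical_modelling | src/Marshall Wace/data_excel/Codility/task3.py | solution
-- ===== SOURCE A (Python) =====
-- def solution(S, K):
--     letter_count = {}
--
--     for s in S:
--         unique_letters = {}
--         for c in s:
--             unique_letters[c] = 1 + unique_letters.get(c, 0)
--         for letter, count in unique_letters.items():
--             letter_count[letter] = max(letter_count.get(letter, 0), count)
--
--     letter_counts = list(letter_count.values())
--     letter_counts.sort(reverse=True)
--
--     result = 0
--     for count in letter_counts:
--         if K >= count:
--             result += count
--             K -= count
--         else:
--             result += K
--             break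
--
--     return result
-- ===== SOURCE B (Python) =====
-- def solution(S, K):
--     best = {}
--     for s in S:
--         for c in dict.fromkeys(s):
--             n = list(s).count(c)
--             if n > best.get(c, 0):
--                 best[c] = n
--     total = sum(best.values())
--     return min(K, total) if best else 0
-- ===== Notes on version B (the rewrite author's own statement) =====
-- stated objective: simpler
-- what changed: Replaces the per-string counter dict, the descending sort and the greedy budget loop by: per-letter maxima taken directly via count over the distinct letters of each string, then the closed form min(K, total) (0 when no letters), since the greedy never skips a count.
import Mathlib
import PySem

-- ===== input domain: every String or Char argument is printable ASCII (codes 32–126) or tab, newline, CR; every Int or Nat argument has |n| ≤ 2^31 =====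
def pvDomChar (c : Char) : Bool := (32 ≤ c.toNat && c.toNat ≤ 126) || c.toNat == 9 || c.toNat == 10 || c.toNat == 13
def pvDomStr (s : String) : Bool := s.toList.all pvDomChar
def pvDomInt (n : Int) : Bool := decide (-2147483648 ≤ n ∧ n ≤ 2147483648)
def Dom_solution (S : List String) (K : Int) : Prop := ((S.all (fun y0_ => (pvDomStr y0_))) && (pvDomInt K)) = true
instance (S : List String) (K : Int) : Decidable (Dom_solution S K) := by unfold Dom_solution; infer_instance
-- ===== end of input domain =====

-- B replaces A's descending sort + greedy budget loop by the closed form min(K, total)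
-- (0 when no letters), and takes per-letter maxima directly over each string's distinct
-- letters; objective: simpler (return value only; neither side mutates its arguments).

-- ===== PORT A =====
-- the 'for count in letter_counts' loop with its break, as structural recursion
def greedyA : List Int → Int → Int → Int
  | [], _, result => result
  | count :: rest, K, result =>
    if K ≥ count then greedyA rest (K - count) (result + count)
    else result + K

def solution (S : List String) (K : Int) : Int :=
  let letter_count := S.foldl (fun lc s =>
    let unique_letters := s.toList.foldl
      (fun u c => u.insert c (1 + u.getD c 0)) (PySem.Dict.empty : PySem.Dict Char Int)
    unique_letters.items.foldl
      (fun lc p => lc.insert p.1 (max (lc.getD p.1 0) p.2)) lc)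
    (PySem.Dict.empty : PySem.Dict Char Int)
  let letter_counts := PySem.List.sorted letter_count.values (fun x => x) true
  greedyA letter_counts K 0

-- ===== PORT B =====
def solution_alt (S : List String) (K : Int) : Int :=
  let best := S.foldl (fun b s =>
    (PySem.List.dedup s.toList).foldl (fun b c =>
      let n : Int := (s.toList.count c : Int)
      if n > b.getD c 0 then b.insert c n else b) b)
    (PySem.Dict.empty : PySem.Dict Char Int)
  let total := best.values.sum
  if best.items.isEmpty then 0 else min K total

-- ===== PRECONDITION & SPEC =====
def Spec_solution (S : List String) (K : Int) (out : Int) : Prop := out = solution_alt S K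
instance (S : List String) (K : Int) (out : Int) : Decidable (Spec_solution S K out) := by unfold Spec_solution; infer_instance

-- ===== CLAIM (what is proved, stated in full; the proofs are below) =====
def Claim_equal_solution : Prop := ∀ (S : List String) (K : Int), Dom_solution S K → Spec_solution S K (solution S K)

-- ===== LEMMAS AND PROOFS =====

-- invariant relating A's letter_count to B's best while folding over S
def DictRel (d b : PySem.Dict Char Int) : Prop :=
  d.keys = b.keys ∧ d.keys.Nodup ∧ (∀ c, d.getD c 0 = b.getD c 0) ∧ (∀ c, 0 ≤ d.getD c 0)

theorem dictRel_empty : DictRel (PySem.Dict.empty : PySem.Dict Char Int) PySem.Dict.empty := by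
  refine ⟨rfl, List.nodup_nil, fun c => rfl, fun c => le_refl 0⟩

-- one merge step over a common list of distinct letters, abstract count function cnt
theorem dictRel_merge (cnt : Char → Int) :
    ∀ (l : List Char) (d b : PySem.Dict Char Int), (∀ c ∈ l, 1 ≤ cnt c) → DictRel d b →
    DictRel (l.foldl (fun d c => d.insert c (max (d.getD c 0) (cnt c))) d)
            (l.foldl (fun b c => if cnt c > b.getD c 0 then b.insert c (cnt c) else b) b) := by
  intro l
  induction l with
  | nil => intro d b _ h; exact h
  | cons c rest ih =>
    intro d b hcnt ⟨hk, hnd, hg, hpos⟩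
    simp only [List.foldl_cons]
    have hc1 : (1:Int) ≤ cnt c := hcnt c (by simp)
    have hcontains : d.contains c = b.contains c := by
      by_cases hm : c ∈ d.keys
      · rw [(PySem.Dict.contains_iff_mem_keys d c).2 hm,
          (PySem.Dict.contains_iff_mem_keys b c).2 (hk ▸ hm)]
      · have hm' : c ∉ b.keys := hk ▸ hm
        cases hdc : d.contains c with
        | true => exact absurd ((PySem.Dict.contains_iff_mem_keys d c).1 hdc) hm
        | false =>
          cases hbc : b.contains c with
          | true => exact absurd ((PySem.Dict.contains_iff_mem_keys b c).1 hbc) hm'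
          | false => rfl
    by_cases hins : cnt c > b.getD c 0
    · -- both sides insert at c
      simp only [if_pos hins]
      apply ih
      · intro x hx; exact hcnt x (by simp [hx])
      refine ⟨?_, PySem.Dict.nodup_keys_insert d c _ hnd, ?_, ?_⟩
      · cases hdc : d.contains c with
        | true =>
          rw [PySem.Dict.keys_insert_of_contains d _ hdc,
            PySem.Dict.keys_insert_of_contains b _ (hcontains ▸ hdc), hk]
        | false =>
          rw [PySem.Dict.keys_insert_of_not_contains d _ hdc,
            PySem.Dict.keys_insert_of_not_contains b _ (hcontains ▸ hdc), hk]
      · intro x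
        rw [PySem.Dict.getD_insert, PySem.Dict.getD_insert]
        by_cases hx : x = c
        · simp only [if_pos hx]
          have := hg c
          omega
        · simp only [if_neg hx]; exact hg x
      · intro x
        rw [PySem.Dict.getD_insert]
        by_cases hx : x = c
        · simp only [if_pos hx]
          have := hpos c; omega
        · simp only [if_neg hx]; exact hpos x
    · -- n ≤ current value: B skips, A overwrites with the same value in place
      simp only [if_neg hins]
      apply ih
      · intro x hx; exact hcnt x (by simp [hx])
      have hge : d.getD c 0 = max (d.getD c 0) (cnt c) := by
        have := hg c; omega
      have hdc : d.contains c = true := by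
        by_contra hno
        have : d.contains c = false := by
          cases h' : d.contains c with
          | true => exact absurd h' hno
          | false => rfl
        have h0 := PySem.Dict.getD_of_not_contains d (0:Int) this
        have := hg c; omega
      refine ⟨?_, PySem.Dict.nodup_keys_insert d c _ hnd, ?_, ?_⟩
      · rw [PySem.Dict.keys_insert_of_contains d _ hdc, hk]
      · intro x
        rw [PySem.Dict.getD_insert]
        by_cases hx : x = c
        · simp only [if_pos hx]; rw [hx, ← hge]; exact hg c
        · simp only [if_neg hx]; exact hg x
      · intro x
        rw [PySem.Dict.getD_insert]
        by_cases hx : x = c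
        · simp only [if_pos hx]
          have := hpos c; omega
        · simp only [if_neg hx]; exact hpos x

-- A's per-string counter fold is PySem.Dict.counter
theorem unique_eq_counter (cs : List Char) :
    cs.foldl (fun u c => u.insert c (1 + u.getD c 0)) (PySem.Dict.empty : PySem.Dict Char Int)
      = PySem.Dict.counter cs := by
  rw [← PySem.Dict.foldl_insert_getD_add_one_eq_counter]
  have : (fun (u : PySem.Dict Char Int) c => u.insert c (1 + u.getD c 0))
       = (fun (u : PySem.Dict Char Int) c => u.insert c (u.getD c 0 + 1)) := by
    funext u c; rw [Int.add_comm]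
  rw [this]

-- the invariant is preserved across one whole string
theorem dictRel_string (s : String) (d b : PySem.Dict Char Int) (h : DictRel d b) :
    DictRel
      ((s.toList.foldl (fun u c => u.insert c (1 + u.getD c 0))
          (PySem.Dict.empty : PySem.Dict Char Int)).items.foldl
        (fun lc p => lc.insert p.1 (max (lc.getD p.1 0) p.2)) d)
      ((PySem.List.dedup s.toList).foldl (fun b c =>
        if (s.toList.count c : Int) > b.getD c 0 then b.insert c (s.toList.count c : Int) else b) b) := by
  rw [unique_eq_counter, PySem.Dict.items_counter, List.foldl_map, PySem.List.dedup_eq_ofList]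
  exact dictRel_merge (fun c => (s.toList.count c : Int)) (PySem.Set.ofList s.toList) d b
    (fun c hc => by
      have hmem : c ∈ s.toList := (PySem.Set.mem_ofList _ _).1 hc
      show (1:Int) ≤ (s.toList.count c : Int)
      exact_mod_cast List.count_pos_iff.2 hmem) h

-- the invariant after the whole fold over S
theorem dictRel_all (S : List String) :
    DictRel
      (S.foldl (fun lc s =>
        (s.toList.foldl (fun u c => u.insert c (1 + u.getD c 0)) PySem.Dict.empty).items.foldl
          (fun lc p => lc.insert p.1 (max (lc.getD p.1 0) p.2)) lc)
        (PySem.Dict.empty : PySem.Dict Char Int))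
      (S.foldl (fun b s =>
        (PySem.List.dedup s.toList).foldl (fun b c =>
          if (s.toList.count c : Int) > b.getD c 0 then b.insert c (s.toList.count c : Int) else b) b)
        (PySem.Dict.empty : PySem.Dict Char Int)) := by
  suffices h : ∀ (d b : PySem.Dict Char Int), DictRel d b →
      DictRel
        (S.foldl (fun lc s =>
          (s.toList.foldl (fun u c => u.insert c (1 + u.getD c 0)) PySem.Dict.empty).items.foldl
            (fun lc p => lc.insert p.1 (max (lc.getD p.1 0) p.2)) lc) d)
        (S.foldl (fun b s =>
          (PySem.List.dedup s.toList).foldl (fun b c =>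
            if (s.toList.count c : Int) > b.getD c 0 then b.insert c (s.toList.count c : Int) else b) b) b) by
    exact h _ _ dictRel_empty
  induction S with
  | nil => intro d b h; exact h
  | cons s rest ih =>
    intro d b h
    simp only [List.foldl_cons]
    exact ih _ _ (dictRel_string s d b h)

-- related dicts have equal values lists, and those values are nonnegative
theorem values_of_dictRel (d b : PySem.Dict Char Int) (h : DictRel d b) :
    d.values = b.values ∧ (∀ v ∈ d.values, (0:Int) ≤ v) := by
  obtain ⟨hk, hnd, hg, hpos⟩ := h
  have hvd := PySem.Dict.values_eq_map_keys d hnd (0:Int)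
  have hvb := PySem.Dict.values_eq_map_keys b (hk ▸ hnd) (0:Int)
  constructor
  · rw [hvd, hvb, hk]
    exact List.map_congr_left (fun k _ => hg k)
  · intro v hv
    rw [hvd] at hv
    obtain ⟨k, _, rfl⟩ := List.mem_map.1 hv
    exact hpos k

-- A's greedy budget loop computes min(K, sum) on a nonempty list of nonnegative counts
theorem greedyA_eq (l : List Int) : ∀ (K r : Int), (∀ x ∈ l, (0:Int) ≤ x) →
    greedyA l K r = if l = [] then r else r + min K l.sum := by
  induction l with
  | nil => intro K r _; simp [greedyA]
  | cons c rest ih =>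
    intro K r hpos
    have hc : (0:Int) ≤ c := hpos c (by simp)
    have hs : (0:Int) ≤ rest.sum := List.sum_nonneg (fun x hx => hpos x (by simp [hx]))
    simp only [greedyA, List.sum_cons, List.cons_ne_nil, if_false]
    by_cases hK : K ≥ c
    · rw [if_pos hK, ih (K - c) (r + c) (fun x hx => hpos x (by simp [hx]))]
      by_cases hrest : rest = []
      · subst hrest; simp only [if_pos]; simp; omega
      · rw [if_neg hrest]; omega
    · rw [if_neg hK]; omega

-- ===== VERDICT (by name: the statement is the Claim_ definition above) =====
theorem solution_spec : Claim_equal_solution := by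
  intro S K _
  unfold Spec_solution solution solution_alt
  obtain ⟨hveq, hvpos⟩ := values_of_dictRel _ _ (dictRel_all S)
  show greedyA (PySem.List.sorted
      (S.foldl (fun lc s =>
        (s.toList.foldl (fun u c => u.insert c (1 + u.getD c 0))
          (PySem.Dict.empty : PySem.Dict Char Int)).items.foldl
          (fun lc p => lc.insert p.1 (max (lc.getD p.1 0) p.2)) lc)
        (PySem.Dict.empty : PySem.Dict Char Int)).values (fun x => x) true) K 0
    = _
  generalize hd : S.foldl (fun lc s =>
      (s.toList.foldl (fun u c => u.insert c (1 + u.getD c 0))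
        (PySem.Dict.empty : PySem.Dict Char Int)).items.foldl
        (fun lc p => lc.insert p.1 (max (lc.getD p.1 0) p.2)) lc)
      (PySem.Dict.empty : PySem.Dict Char Int) = d at hveq hvpos ⊢
  generalize hbb : S.foldl (fun b s =>
      (PySem.List.dedup s.toList).foldl (fun b c =>
        if (s.toList.count c : Int) > b.getD c 0 then b.insert c (s.toList.count c : Int) else b) b)
      (PySem.Dict.empty : PySem.Dict Char Int) = b at hveq ⊢
  have hperm := PySem.List.sorted_perm d.values (fun x => x) true
  have hmem : ∀ x ∈ PySem.List.sorted d.values (fun x => x) true, (0:Int) ≤ x :=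
    fun x hx => hvpos x ((PySem.List.mem_sorted _ _ _ x).1 hx)
  rw [greedyA_eq _ K 0 hmem]
  have hsum : (PySem.List.sorted d.values (fun x => x) true).sum = d.values.sum := hperm.sum_eq
  have hbvals : b.values = b.items.map (·.2) := rfl
  by_cases hnil : d.values = []
  · rw [if_pos (by rw [PySem.List.sorted_eq_nil_iff]; exact hnil)]
    have hie : b.items.isEmpty = true := by
      have hm : b.items.map (·.2) = [] := by rw [← hbvals, ← hveq, hnil]
      simpa [List.isEmpty_iff] using List.map_eq_nil_iff.1 hm
    rw [if_pos hie]
  · rw [if_neg (by simpa [PySem.List.sorted_eq_nil_iff] using hnil)]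
    have hne : ¬ b.items.isEmpty = true := by
      intro h
      apply hnil
      rw [hveq, hbvals, List.isEmpty_iff.1 h]; rfl
    rw [if_neg hne, hsum, hveq]
    omega
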